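-- pv_equiv track=rewrite | github.com/dontk1llme/TIL | [PGMS]/[PGMS] 121683.py | solution
-- ===== SOURCE A (Python) =====
-- def solution(input_string):
--     answer = ''
--     solo = []
--     dic = {}
--     now = ''
--
--     for s in input_string:
--         if dic.get(s) is None :
--             dic[s] = 1
--         else:
--             if s != now:
--                 solo.append(s)
--         now = s
--
--     if len(solo) == 0:
--         answer = 'N'
--     else:
--         answer = "".join(sorted(set(solo)))
--
--     return answer
-- ===== SOURCE B (Python) =====
-- def solution(input_string):
--     # Compress the string into the head characters of its maximal runs, sort
--     # them, then group-scan the sorted run heads: a character repeats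
--     # non-adjacently iff it heads at least two runs.  No dict / seen-set.
--     runs = []
--     for c in input_string:
--         if not runs or runs[-1] != c:
--             runs.append(c)
--     runs.sort()
--     out = []
--     i = 0
--     n = len(runs)
--     while i < n:
--         j = i
--         while j < n and runs[j] == runs[i]:
--             j += 1
--         if j - i >= 2:
--             out.append(runs[i])
--         i = j
--     return ''.join(out) if out else 'N'
-- ===== Notes on version B (the rewrite author's own statement) =====
-- stated objective: alternative
-- what changed: A tracks a seen-dict plus a solo list during one character pass and finally sorts a set; B first compresses the string to its maximal-run head characters, sorts that run list, and group-scans adjacent equal run heads (a char repeats non-adjacently iff it heads two or more runs), using no dict or set at all.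
import Mathlib
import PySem

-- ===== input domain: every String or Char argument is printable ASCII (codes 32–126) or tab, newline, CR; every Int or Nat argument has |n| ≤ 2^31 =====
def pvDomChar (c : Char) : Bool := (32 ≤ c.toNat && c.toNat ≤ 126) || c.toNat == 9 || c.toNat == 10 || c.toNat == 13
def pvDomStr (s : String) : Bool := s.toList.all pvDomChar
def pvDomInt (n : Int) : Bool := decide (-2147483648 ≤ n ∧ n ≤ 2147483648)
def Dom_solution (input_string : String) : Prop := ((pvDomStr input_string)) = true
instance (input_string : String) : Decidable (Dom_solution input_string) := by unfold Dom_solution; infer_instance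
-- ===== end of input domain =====

-- B replaces A's seen-dict + solo list by: compress to maximal-run heads, sort, group-scan (no dict/set).

-- ===== PORT A =====
-- loop body of A: 'now' is ported as Option Char (Python's initial '' never equals a 1-char string)
def solutionStep (st : List Char × PySem.Dict Char Int × Option Char) (s : Char) :
    List Char × PySem.Dict Char Int × Option Char :=
  match st with
  | (solo, dic, now) =>
    if (dic.get? s).isNone then (solo, dic.insert s 1, some s)
    else (if some s ≠ now then solo ++ [s] else solo, dic, some s)

def solution (input_string : String) : String :=
  let st := input_string.toList.foldl solutionStep ([], PySem.Dict.empty, none)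
  if st.1.length = 0 then "N"
  else String.ofList (PySem.List.sorted (PySem.Set.ofList st.1) (fun x => x) false)

-- ===== PORT B =====
-- stage-1 loop body: 'if not runs or runs[-1] != c: runs.append(c)' (runs[-1] on a nonempty list = getLast?)
def compressStep (runs : List Char) (c : Char) : List Char :=
  if runs = [] ∨ runs.getLast? ≠ some c then runs ++ [c] else runs

-- stage-2 while loops over indices i, j: the inner 'while runs[j] == runs[i]' counts the group
-- (takeWhile) and 'i = j' advances past it (dropWhile) — exact transcription of the index scan.
def groupScan : List Char → List Char
  | [] => []
  | a :: t =>
    if 2 ≤ (t.takeWhile (· == a)).length + 1 then a :: groupScan (t.dropWhile (· == a))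
    else groupScan (t.dropWhile (· == a))
termination_by l => l.length
decreasing_by all_goals simpa using Nat.lt_succ_of_le (List.length_dropWhile_le _ t)

def solution_alt (input_string : String) : String :=
  let runs := input_string.toList.foldl compressStep []
  let out := groupScan (PySem.List.sorted runs (fun x => x) false)
  if out = [] then "N" else String.ofList out

-- ===== PRECONDITION & SPEC =====
def Spec_solution (input_string : String) (out : String) : Prop := out = solution_alt input_string
instance (input_string : String) (out : String) : Decidable (Spec_solution input_string out) := by unfold Spec_solution; infer_instance

-- ===== CLAIM (what is proved, stated in full; the proofs are below) =====
def Claim_equal_solution : Prop := ∀ (input_string : String), Dom_solution input_string → Spec_solution input_string (solution input_string)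

-- ===== LEMMAS AND PROOFS =====

-- invariant: A's state (solo, dic, now) against B's stage-1 run-head list
def AInv (solo : List Char) (dic : PySem.Dict Char Int) (now : Option Char)
    (runs : List Char) : Prop :=
  (∀ c, (dic.get? c).isSome = true ↔ c ∈ runs) ∧
  (∀ c, c ∈ solo ↔ 2 ≤ runs.count c) ∧
  now = runs.getLast?

lemma inv_step (solo : List Char) (dic : PySem.Dict Char Int) (now : Option Char)
    (runs : List Char) (c : Char) (h : AInv solo dic now runs) :
    AInv (solutionStep (solo, dic, now) c).1 (solutionStep (solo, dic, now) c).2.1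
      (solutionStep (solo, dic, now) c).2.2 (compressStep runs c) := by
  obtain ⟨h1, h2, h3⟩ := h
  by_cases hc : runs = [] ∨ runs.getLast? ≠ some c
  · -- a new run starts: B appends c to runs
    have hnow : some c ≠ now := by
      rw [h3]
      rcases hc with hc | hc
      · subst hc; simp
      · exact fun he => hc he.symm
    simp only [compressStep, if_pos hc]
    by_cases hd : (dic.get? c).isNone
    · -- first ever occurrence of c
      have hnm : c ∉ runs := by
        intro hm
        have := (h1 c).2 hm
        rcases Option.isNone_iff_eq_none.1 hd with he
        rw [he] at this; simp at this
      have hc0 : runs.count c = 0 := List.count_eq_zero.2 hnm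
      simp only [solutionStep, if_pos hd]
      refine ⟨?_, ?_, by rw [List.getLast?_concat]⟩
      · intro c'
        rw [PySem.Dict.get?_insert]
        by_cases he : c' = c
        · simp [he]
        · simp only [List.mem_append, List.mem_singleton, he, or_false]
          exact h1 c'
      · intro c'
        rw [List.count_append]
        by_cases he : c' = c
        · subst he
          have h1c : List.count c' [c'] = 1 := by simp
          rw [hc0, h1c]
          exact ⟨fun hm => absurd ((h2 c').1 hm) (by omega), fun hx => absurd hx (by omega)⟩
        · have h0 : List.count c' [c] = 0 := List.count_eq_zero.2 (by simpa using he)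
          rw [h0]
          simpa using h2 c'
    · -- c was seen before: A appends to solo
      have hds : (dic.get? c).isSome = true := by
        cases he : dic.get? c with
        | none => exact absurd (by simp [he]) hd
        | some v => simp
      have hmem : c ∈ runs := (h1 c).1 hds
      have hc1 : 1 ≤ runs.count c := List.count_pos_iff.2 hmem
      simp only [solutionStep, if_neg hd, if_pos hnow]
      refine ⟨?_, ?_, by rw [List.getLast?_concat]⟩
      · intro c'
        by_cases he : c' = c
        · subst he; simp [hds, hmem]
        · simp only [List.mem_append, List.mem_singleton, he, or_false]
          exact h1 c'
      · intro c'
        rw [List.count_append]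
        by_cases he : c' = c
        · subst he
          have h1c : List.count c' [c'] = 1 := by simp
          rw [h1c]
          exact ⟨fun _ => by omega, fun _ => List.mem_append.2 (Or.inr (by simp))⟩
        · have h0 : List.count c' [c] = 0 := List.count_eq_zero.2 (by simpa using he)
          rw [h0, Nat.add_zero]
          simp only [List.mem_append, List.mem_singleton, he, or_false]
          exact h2 c'
  · -- c continues the current run: both states unchanged
    rw [not_or, not_not] at hc
    obtain ⟨hne, hlast⟩ := hc
    have hnow : now = some c := by rw [h3, hlast]
    have hmem : c ∈ runs := List.mem_of_getLast? hlast
    have hds : (dic.get? c).isSome = true := (h1 c).2 hmem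
    have hd : (dic.get? c).isNone = false := by
      cases he : dic.get? c with
      | none => rw [he] at hds; simp at hds
      | some v => simp
    have hcc : ¬ (runs = [] ∨ runs.getLast? ≠ some c) := by
      rw [not_or, not_not]; exact ⟨hne, hlast⟩
    simp only [compressStep, if_neg hcc, solutionStep, hd, Bool.false_eq_true, ite_false,
      hnow, ne_eq, not_true_eq_false, ite_false]
    exact ⟨h1, h2, hlast.symm⟩

lemma inv_fold (l : List Char) (solo : List Char) (dic : PySem.Dict Char Int)
    (now : Option Char) (runs : List Char) (h : AInv solo dic now runs) :
    AInv (l.foldl solutionStep (solo, dic, now)).1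
      (l.foldl solutionStep (solo, dic, now)).2.1
      (l.foldl solutionStep (solo, dic, now)).2.2
      (l.foldl compressStep runs) := by
  induction l generalizing solo dic now runs with
  | nil => exact h
  | cons c t ih =>
    simp only [List.foldl_cons]
    exact ih _ _ _ _ (inv_step solo dic now runs c h)

-- the group scan of a ≤-sorted list: membership = multiplicity ≥ 2, and the output is strictly increasing
lemma groupScan_spec (l : List Char) (hs : l.Pairwise (· ≤ ·)) :
    (∀ c, c ∈ groupScan l ↔ 2 ≤ l.count c) ∧ (groupScan l).Pairwise (· < ·) := by
  induction hn : l.length using Nat.strong_induction_on generalizing l with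
  | _ n ih =>
  cases l with
  | nil => simp [groupScan]
  | cons a t =>
    have hta : ∀ x ∈ t, a ≤ x := (List.pairwise_cons.1 hs).1
    have hts : t.Pairwise (· ≤ ·) := (List.pairwise_cons.1 hs).2
    set tk := t.takeWhile (· == a) with htk
    set dr := t.dropWhile (· == a) with hdr
    have htd : tk ++ dr = t := List.takeWhile_append_dropWhile
    have hdrs : dr.Pairwise (· ≤ ·) := hts.sublist (List.dropWhile_sublist _)
    have hdrgt : ∀ x ∈ dr, a < x := by
      intro x hx
      have hle : a ≤ x := hta x ((List.dropWhile_sublist _).subset hx)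
      rcases lt_or_eq_of_le hle with h | h
      · exact h
      · exfalso
        -- the first element of dr is ≠ a, and every element of dr is ≥ it
        cases hd : dr with
        | nil => rw [hd] at hx; simp at hx
        | cons b r =>
          have hbne : ¬ (b == a) = true := by
            have := List.head?_dropWhile_not (· == a) t
            rw [← hdr, hd] at this; simpa using this
          have hbx : b ≤ x := by
            rw [hd] at hx
            rcases List.mem_cons.1 hx with rfl | hx'
            · exact le_refl _
            · exact (List.pairwise_cons.1 (hd ▸ hdrs)).1 _ hx'
          have hab : a ≤ b := hta b ((List.dropWhile_sublist _).subset (by rw [← hdr, hd]; simp))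
          have hba : b = a := le_antisymm (h ▸ hbx) hab
          exact hbne (beq_iff_eq.2 hba)
    have hcnt_tk : tk.count a = tk.length := by
      rw [List.count_eq_length]
      intro b hb
      rw [htk] at hb
      have hba := List.mem_takeWhile_imp hb
      simp only [beq_iff_eq] at hba
      exact hba.symm
    have hcnt_dr : dr.count a = 0 :=
      List.count_eq_zero.2 (fun hm => lt_irrefl a (hdrgt a hm))
    have hcnt_a : (a :: t).count a = tk.length + 1 := by
      rw [List.count_cons_self, ← htd, List.count_append, hcnt_tk, hcnt_dr]
    have hcnt_ne : ∀ c, c ≠ a → (a :: t).count c = dr.count c := by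
      intro c hca
      have hcc : List.count c (a :: t) = List.count c t := by simp [Ne.symm hca]
      rw [hcc, ← htd, List.count_append]
      have : tk.count c = 0 := by
        rw [List.count_eq_zero]
        intro hm
        exact hca (by simpa using List.mem_takeWhile_imp hm)
      omega
    have hlen : dr.length < n := by
      rw [← hn]
      simpa using Nat.lt_succ_of_le (List.length_dropWhile_le _ t)
    obtain ⟨ihm, ihp⟩ := ih dr.length hlen dr hdrs rfl
    have hsub : ∀ c ∈ groupScan dr, c ∈ dr := by
      intro c hc
      exact List.count_pos_iff.1 (by have := (ihm c).1 hc; omega)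
    by_cases hb : 2 ≤ tk.length + 1
    · rw [groupScan, if_pos hb, ← hdr]
      constructor
      · intro c
        simp only [List.mem_cons]
        constructor
        · rintro (rfl | hc)
          · omega
          · have hcdr : c ∈ dr := hsub c hc
            have hca : c ≠ a := (hdrgt c hcdr).ne'
            rw [hcnt_ne c hca]
            have := (ihm c).1 hc
            omega
        · intro hx
          by_cases hca : c = a
          · exact Or.inl hca
          · exact Or.inr ((ihm c).2 (by rw [hcnt_ne c hca] at hx; exact hx))
      · exact List.pairwise_cons.2 ⟨fun c hc => hdrgt c (hsub c hc), ihp⟩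
    · rw [groupScan, if_neg hb, ← hdr]
      have htk0 : tk.length = 0 := by omega
      refine ⟨?_, ihp⟩
      intro c
      rw [ihm c]
      by_cases hca : c = a
      · subst hca
        rw [hcnt_a, htk0, hcnt_dr]
        omega
      · rw [hcnt_ne c hca]

-- ===== VERDICT (by name: the statement is the Claim_ definition above) =====
theorem solution_spec : Claim_equal_solution := by
  intro s _
  simp only [Spec_solution, solution, solution_alt]
  have hbase : AInv [] PySem.Dict.empty none [] := by
    refine ⟨?_, ?_, rfl⟩ <;> simp [PySem.Dict.get?_empty]
  have H := inv_fold s.toList [] PySem.Dict.empty none [] hbase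
  set stA := s.toList.foldl solutionStep ([], PySem.Dict.empty, none) with hA
  set runs := s.toList.foldl compressStep [] with hR
  obtain ⟨h1, h2, h3⟩ := H
  set sr := PySem.List.sorted runs (fun x => x) false with hsr
  have hsrp : sr.Pairwise (· ≤ ·) := PySem.List.sorted_pairwise runs (fun x => x)
  have hsperm : sr.Perm runs := PySem.List.sorted_perm runs (fun x => x) false
  obtain ⟨hm, hp⟩ := groupScan_spec sr hsrp
  have hmem : ∀ c, c ∈ groupScan sr ↔ c ∈ stA.1 := by
    intro c
    rw [hm c, hsperm.count_eq, h2 c]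
  by_cases hsolo : stA.1 = []
  · have hge : groupScan sr = [] := by
      rw [List.eq_nil_iff_forall_not_mem]
      intro c hc
      have := (hmem c).1 hc
      rw [hsolo] at this
      simp at this
    rw [hge, hsolo]
    simp
  · have hlen0 : ¬ stA.1.length = 0 := by
      simpa [List.length_eq_zero_iff] using hsolo
    have hgne : groupScan sr ≠ [] := by
      intro he
      rcases List.exists_mem_of_ne_nil _ hsolo with ⟨x, hx⟩
      have := (hmem x).2 hx
      rw [he] at this
      simp at this
    have hnd : (groupScan sr).Nodup := List.Pairwise.imp (fun h => ne_of_lt h) hp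
    have hperm : (groupScan sr).Perm (PySem.Set.ofList stA.1) := by
      refine (List.perm_ext_iff_of_nodup hnd (PySem.Set.nodup_ofList _)).2 ?_
      intro c
      rw [PySem.Set.mem_ofList, hmem c]
    have hsorted : PySem.List.sorted (PySem.Set.ofList stA.1) (fun x => x) false =
        groupScan sr :=
      PySem.List.sorted_eq_of_perm_of_pairwise_lt _ _ _ hperm hp
    rw [if_neg hlen0, if_neg hgne, hsorted]
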